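-- pv_equiv track=rewrite | github.com/ep4518/AoC | Day13/day13_2.py | parse
-- ===== SOURCE A (Python) =====
-- def parse(rows):
--     grid, grids  = [], []
--     for row in rows:
--         row = row.replace("\n", "")
--         if row:
--             grid.append(row)
--         else:
--             grids.append(grid)
--             grid = []
--     grids.append(grid)
--     return grids
-- ===== SOURCE B (Python) =====
-- def parse(rows):
--     # staged: strip first, locate blank-line indices, then cut grids out by slicing
--     stripped = [r.replace("\n", "") for r in rows]
--     blanks = [i for i, s in enumerate(stripped) if not s]
--     grids, start = [], 0
--     for b in blanks:
--         grids.append(stripped[start:b])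
--         start = b + 1
--     grids.append(stripped[start:])
--     return grids
-- ===== Notes on version B (the rewrite author's own statement) =====
-- stated objective: alternative
-- what changed: B works in three stages - strip every row, collect the indices of blank lines, then cut the grids out of the stripped list by slicing between consecutive blank indices - instead of A's single pass with a current-grid accumulator flushed at each blank.
import Mathlib
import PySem

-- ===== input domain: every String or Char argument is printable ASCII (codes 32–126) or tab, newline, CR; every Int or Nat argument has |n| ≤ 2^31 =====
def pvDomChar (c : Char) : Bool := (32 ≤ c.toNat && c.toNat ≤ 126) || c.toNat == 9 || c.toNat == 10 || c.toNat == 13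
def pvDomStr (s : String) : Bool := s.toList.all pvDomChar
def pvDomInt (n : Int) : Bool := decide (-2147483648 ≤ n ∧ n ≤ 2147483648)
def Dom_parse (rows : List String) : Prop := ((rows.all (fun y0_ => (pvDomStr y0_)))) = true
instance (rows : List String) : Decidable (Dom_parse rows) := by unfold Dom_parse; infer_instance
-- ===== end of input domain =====

-- B strips all rows first, collects the blank-line indices, then cuts grids out by slicing
-- between consecutive blanks; A's one-pass flush-on-blank accumulator loop is replaced by
-- this staged index-then-slice decomposition (same cost, different structure).

-- ===== PORT A =====
def parse (rows : List String) : List (List String) :=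
  let p := rows.foldl (fun (st : List String × List (List String)) row =>
    let row := PySem.Str.replace row "\n" ""
    if row ≠ "" then (st.1 ++ [row], st.2) else ([], st.2 ++ [st.1])) ([], [])
  p.2 ++ [p.1]

-- ===== PORT B =====
def parse_alt (rows : List String) : List (List String) :=
  let stripped := rows.map (fun r => PySem.Str.replace r "\n" "")
  let blanks := (PySem.List.enumerate stripped 0).filterMap
    (fun p => if p.2 = "" then some p.1 else none)
  let st := blanks.foldl (fun (st : List (List String) × Int) b =>
    (st.1 ++ [PySem.List.slice stripped (some st.2) (some b)], b + 1)) ([], 0)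
  st.1 ++ [PySem.List.slice stripped (some st.2) none]

-- ===== PRECONDITION & SPEC =====
def Spec_parse (rows : List String) (out : List (List String)) : Prop := out = parse_alt rows
instance (rows : List String) (out : List (List String)) : Decidable (Spec_parse rows out) := by unfold Spec_parse; infer_instance

-- ===== CLAIM (what is proved, stated in full; the proofs are below) =====
def Claim_equal_parse : Prop := ∀ (rows : List String), Dom_parse rows → Spec_parse rows (parse rows)

-- ===== LEMMAS AND PROOFS =====

-- reference recursion: split an (already stripped) list of lines into grids at blank lines
def splitBlank : List String → List (List String)
  | [] => [[]]
  | s :: rest =>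
    match splitBlank rest with
    | g :: gs => if s ≠ "" then (s :: g) :: gs else [] :: g :: gs
    | [] => []

theorem splitBlank_ne_nil (l : List String) : splitBlank l ≠ [] := by
  induction l with
  | nil => simp [splitBlank]
  | cons s rest ih =>
    simp only [splitBlank]
    cases h : splitBlank rest with
    | nil => exact absurd h ih
    | cons g gs => by_cases hs : s ≠ "" <;> simp [hs]

theorem parse_eq_aux (rows : List String) (grid : List String) (grids : List (List String)) :
    (rows.foldl (fun (st : List String × List (List String)) row =>
      let row := PySem.Str.replace row "\n" ""
      if row ≠ "" then (st.1 ++ [row], st.2) else ([], st.2 ++ [st.1])) (grid, grids)).2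
    ++ [(rows.foldl (fun (st : List String × List (List String)) row =>
      let row := PySem.Str.replace row "\n" ""
      if row ≠ "" then (st.1 ++ [row], st.2) else ([], st.2 ++ [st.1])) (grid, grids)).1]
    = grids ++ (match splitBlank (rows.map (fun r => PySem.Str.replace r "\n" "")) with
      | g :: gs => (grid ++ g) :: gs
      | [] => [grid]) := by
  induction rows generalizing grid grids with
  | nil => simp [splitBlank]
  | cons r rs ih =>
    simp only [List.foldl_cons, List.map_cons, splitBlank]
    by_cases h : PySem.Str.replace r "\n" "" = ""
    · simp only [h, ne_eq, not_true_eq_false, if_false]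
      rw [ih]
      cases hs : splitBlank (rs.map (fun r => PySem.Str.replace r "\n" "")) with
      | nil => exact absurd hs (splitBlank_ne_nil _)
      | cons g gs => simp [List.append_assoc]
    · simp only [ne_eq, h, not_false_eq_true, if_true]
      rw [ih]
      cases hs : splitBlank (rs.map (fun r => PySem.Str.replace r "\n" "")) with
      | nil => exact absurd hs (splitBlank_ne_nil _)
      | cons g gs => simp [List.append_assoc]

theorem parse_eq_splitBlank (rows : List String) :
    parse rows = splitBlank (rows.map (fun r => PySem.Str.replace r "\n" "")) := by
  unfold parse
  have := parse_eq_aux rows [] []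
  simp only at this
  rw [this]
  cases hs : splitBlank (rows.map (fun r => PySem.Str.replace r "\n" "")) with
  | nil => exact absurd hs (splitBlank_ne_nil _)
  | cons g gs => simp

-- invariant for B's slicing loop: l is the suffix full.drop k, the pending start is j ≤ k
theorem parse_alt_aux (full : List String) (l : List String) (k j : Nat) (gs : List (List String))
    (hjk : j ≤ k) (hl : full.drop k = l) :
    (let st := ((PySem.List.enumerate l (k : Int)).filterMap
        (fun p => if p.2 = "" then some p.1 else none)).foldl
      (fun (st : List (List String) × Int) b =>
        (st.1 ++ [PySem.List.slice full (some st.2) (some b)], b + 1)) (gs, (j : Int));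
     st.1 ++ [PySem.List.slice full (some st.2) none])
    = gs ++ (match splitBlank l with
      | g :: rest => ((full.drop j).take (k - j) ++ g) :: rest
      | [] => []) := by
  induction l generalizing k j gs with
  | nil =>
    simp only [PySem.List.enumerate_nil, List.filterMap_nil, List.foldl_nil, splitBlank]
    rw [PySem.List.slice_from_natCast]
    have hlen : full.length ≤ k := by
      have := congrArg List.length hl; simp at this; omega
    have : (full.drop j).take (k - j) = full.drop j := by
      apply List.take_of_length_le; simp; omega
    simp [this]
  | cons s rest ih =>
    have hrest : full.drop (k + 1) = rest := by
      rw [← List.drop_drop]; rw [hl]; rfl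
    have hcast : ((k : Int) + 1) = ((k + 1 : Nat) : Int) := by push_cast; ring
    simp only [PySem.List.enumerate_cons, List.filterMap_cons, splitBlank]
    by_cases hs : s = ""
    · subst hs
      simp only [if_true, ne_eq, not_true_eq_false, if_false, List.foldl_cons, hcast]
      have := ih (k + 1) (k + 1) (gs ++ [PySem.List.slice full (some (j : Int)) (some (k : Int))])
        (le_refl _) hrest
      simp only at this
      rw [this]
      rw [PySem.List.slice_natCast]
      cases hr : splitBlank rest with
      | nil => exact absurd hr (splitBlank_ne_nil _)
      | cons g grest => simp [List.append_assoc]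
    · simp only [hs, if_false, hcast]
      have := ih (k + 1) j gs (by omega) hrest
      simp only at this
      rw [this]
      cases hr : splitBlank rest with
      | nil => exact absurd hr (splitBlank_ne_nil _)
      | cons g grest =>
        simp only [ne_eq, hs, not_false_eq_true, if_true]
        have htake : (full.drop j).take (k + 1 - j) = (full.drop j).take (k - j) ++ [s] := by
          have h1 : k + 1 - j = (k - j) + 1 := by omega
          rw [h1, List.take_add]
          congr 1
          rw [List.drop_drop]
          have : j + (k - j) = k := by omega
          rw [this, hl]
          rfl
        simp [htake]

theorem parse_alt_eq_splitBlank (rows : List String) :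
    parse_alt rows = splitBlank (rows.map (fun r => PySem.Str.replace r "\n" "")) := by
  unfold parse_alt
  have := parse_alt_aux (rows.map (fun r => PySem.Str.replace r "\n" ""))
    (rows.map (fun r => PySem.Str.replace r "\n" "")) 0 0 [] (le_refl _) (by simp)
  simp only [Nat.cast_zero] at this
  rw [this]
  cases hs : splitBlank (rows.map (fun r => PySem.Str.replace r "\n" "")) with
  | nil => exact absurd hs (splitBlank_ne_nil _)
  | cons g gs => simp

-- ===== VERDICT (by name: the statement is the Claim_ definition above) =====
theorem parse_spec : Claim_equal_parse := by
  intro rows _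
  unfold Spec_parse
  rw [parse_eq_splitBlank, parse_alt_eq_splitBlank]
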